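-- pv_equiv track=rewrite | github.com/nullpullos/base64-python | base64tool.py | binblock
-- ===== SOURCE A (Python) =====
-- def binblock(listedbin):
--     strbin = ""
--     block = []
--     firstsix = 0
--     secondsix = 6
--     counter = 0
--
--     for i in range(len(listedbin)):
--         strbin += listedbin[i]
--
--     for i in range(len(strbin)):
--         firstbyte = strbin [firstsix:secondsix]
--
--         if firstbyte == "":
--             continue
--         else:
--
--             if (len(firstbyte)) != 6:
--                 firstbyte = firstbyte.ljust(6, '0')
--
--             block.append(firstbyte)
--
--         firstsix += 6
--         secondsix += 6
--
--     return block
-- ===== SOURCE B (Python) =====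
-- def binblock(listedbin):
--     block = []
--     cur = ""
--     for ch in "".join(listedbin):
--         cur += ch
--         if len(cur) == 6:
--             block.append(cur)
--             cur = ""
--     if cur:
--         block.append(cur.ljust(6, '0'))
--     return block
-- ===== Notes on version B (the rewrite author's own statement) =====
-- stated objective: alternative
-- what changed: B replaces A's index-step slicing loop (firstsix/secondsix offsets sliced out of the joined string, looping len(strbin) times with empty-slice continues) by a single character pass that maintains a buffer `cur` and flushes it to the result each time it reaches 6 chars, padding the final partial buffer.
import Mathlib
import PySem

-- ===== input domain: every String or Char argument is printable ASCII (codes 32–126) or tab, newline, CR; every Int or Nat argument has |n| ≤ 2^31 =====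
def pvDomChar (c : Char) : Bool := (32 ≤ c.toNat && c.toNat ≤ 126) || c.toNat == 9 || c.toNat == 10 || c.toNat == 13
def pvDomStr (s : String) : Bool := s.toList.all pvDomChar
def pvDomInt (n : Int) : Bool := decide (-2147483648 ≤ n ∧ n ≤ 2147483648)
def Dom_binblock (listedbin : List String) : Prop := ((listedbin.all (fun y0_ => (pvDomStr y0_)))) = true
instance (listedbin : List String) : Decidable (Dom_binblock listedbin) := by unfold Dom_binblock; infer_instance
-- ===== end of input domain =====

-- B replaces A's index-step slicing loop by a single pass with a buffer flushed at 6 chars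
-- (objective: alternative decomposition; equivalence of the RETURN value is proved for all inputs).

-- s.ljust(6, '0') for a list of chars (exact: pads on the right with '0' up to width 6)
def pvLjust6 (cs : List Char) : List Char := cs ++ List.replicate (6 - cs.length) '0'

-- ===== PORT A =====
-- A's loop body over `for i in range(len(strbin))` with state (block, firstsix, secondsix)
def pvAStep (strbin : List Char) (st : List (List Char) × Nat × Nat) : List (List Char) × Nat × Nat :=
  let (block, firstsix, secondsix) := st
  let firstbyte := PySem.List.slice strbin (some (firstsix : Int)) (some (secondsix : Int))
  if firstbyte = [] then st
  else
    let firstbyte := if firstbyte.length ≠ 6 then pvLjust6 firstbyte else firstbyte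
    (block ++ [firstbyte], firstsix + 6, secondsix + 6)

def binblock (listedbin : List String) : List String :=
  -- for i in range(len(listedbin)): strbin += listedbin[i]
  let strbin : List Char := listedbin.foldl (fun acc s => acc ++ s.toList) []
  -- for i in range(len(strbin)): … (the index i is never used; state is (block, firstsix, secondsix))
  let st := (List.range strbin.length).foldl (fun st _ => pvAStep strbin st) ([], 0, 6)
  st.1.map String.mk

-- ===== PORT B =====
-- B's loop body: append the char to the buffer, flush the buffer when it reaches 6
def pvBStep (st : List (List Char) × List Char) (ch : Char) : List (List Char) × List Char :=
  let cur := st.2 ++ [ch]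
  if cur.length = 6 then (st.1 ++ [cur], []) else (st.1, cur)

def binblock_alt (listedbin : List String) : List String :=
  let joined : List Char := listedbin.foldl (fun acc s => acc ++ s.toList) []  -- "".join(listedbin)
  let st := joined.foldl pvBStep ([], [])
  (if st.2 = [] then st.1 else st.1 ++ [pvLjust6 st.2]).map String.mk

-- ===== PRECONDITION & SPEC =====
def Spec_binblock (listedbin : List String) (out : List String) : Prop := out = binblock_alt listedbin
instance (listedbin : List String) (out : List String) : Decidable (Spec_binblock listedbin out) := by unfold Spec_binblock; infer_instance

-- ===== CLAIM (what is proved, stated in full; the proofs are below) =====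
def Claim_equal_binblock : Prop := ∀ (listedbin : List String), Dom_binblock listedbin → Spec_binblock listedbin (binblock listedbin)

-- ===== LEMMAS AND PROOFS =====

-- common characterisation: the 6-chunks of a char list, last chunk right-padded with '0'
def pvChunks (l : List Char) : List (List Char) :=
  if h : l = [] then [] else pvLjust6 (l.take 6) :: pvChunks (l.drop 6)
  termination_by l.length
  decreasing_by
    cases l with
    | nil => exact absurd rfl h
    | cons a t => simp [List.length_drop]

theorem pvLjust6_of_len_six (cs : List Char) (h : cs.length = 6) : pvLjust6 cs = cs := by
  simp [pvLjust6, h]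

theorem pvPad_eq (cs : List Char) : (if cs.length ≠ 6 then pvLjust6 cs else cs) = pvLjust6 cs := by
  by_cases h : cs.length = 6
  · simp [h, pvLjust6_of_len_six _ h]
  · simp [h]

theorem pvSlice_eq (l : List Char) (a b : Nat) :
    PySem.List.slice l (some (a : Int)) (some (b : Int)) = (l.drop a).take (b - a) := by
  simp only [Nat.cast_nonneg, PySem.List.slice_toNat, Int.toNat_natCast]

-- A's second loop, run with fuel n ≥ the number of chars left from offset fs, yields the chunks
theorem pvA_loop (strbin : List Char) :
    ∀ (n fs : Nat) (block : List (List Char)), strbin.length - fs ≤ n →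
      ((List.range n).foldl (fun st _ => pvAStep strbin st) (block, fs, fs + 6)).1
        = block ++ pvChunks (strbin.drop fs) := by
  intro n
  induction n with
  | zero =>
    intro fs block h
    have hd : strbin.drop fs = [] := by
      rw [List.drop_eq_nil_iff]; omega
    simp [hd, pvChunks]
  | succ n ih =>
    intro fs block h
    rw [List.range_succ_eq_map, List.foldl_cons, List.foldl_map]
    by_cases hd : strbin.drop fs = []
    · have hsl : PySem.List.slice strbin (some (fs : Int)) (some ((fs + 6 : Nat) : Int)) = [] := by
        rw [pvSlice_eq, hd]; simp
      have hstep : pvAStep strbin (block, fs, fs + 6) = (block, fs, fs + 6) := by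
        simp only [pvAStep]; rw [hsl]; simp
      rw [hstep, ih fs block (by have := List.drop_eq_nil_iff.mp hd; omega)]
    · have hfb : PySem.List.slice strbin (some (fs : Int)) (some ((fs + 6 : Nat) : Int))
          = (strbin.drop fs).take 6 := by
        rw [pvSlice_eq]; congr 1; omega
      have hne : (strbin.drop fs).take 6 ≠ [] := by
        simp [List.take_eq_nil_iff, hd]
      have hstep : pvAStep strbin (block, fs, fs + 6)
          = (block ++ [pvLjust6 ((strbin.drop fs).take 6)], fs + 6, fs + 6 + 6) := by
        simp only [pvAStep]; rw [hfb, if_neg hne, pvPad_eq]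
      rw [hstep, ih (fs + 6) _ (by omega), List.append_assoc]
      congr 1
      conv_rhs => rw [pvChunks]
      rw [dif_neg hd]
      simp [List.drop_drop]

-- B's loop with a buffer of length < 6, then the final flush, yields the chunks of cur ++ l
theorem pvB_loop :
    ∀ (l : List Char) (block : List (List Char)) (cur : List Char), cur.length < 6 →
      (let st := l.foldl pvBStep (block, cur)
       if st.2 = [] then st.1 else st.1 ++ [pvLjust6 st.2])
        = block ++ pvChunks (cur ++ l) := by
  intro l
  induction l with
  | nil =>
    intro block cur hc
    by_cases h0 : cur = []
    · simp [h0, pvChunks]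
    · have htk : cur.take 6 = cur := List.take_of_length_le (by omega)
      have hd6 : cur.drop 6 = [] := by rw [List.drop_eq_nil_iff]; omega
      simp only [List.append_nil, List.foldl_nil]
      rw [pvChunks]
      simp [h0, htk, hd6, pvChunks]
  | cons c t ih =>
    intro block cur hc
    simp only [List.foldl_cons]
    have hsplit : cur ++ c :: t = (cur ++ [c]) ++ t := by simp
    by_cases h6 : (cur ++ [c]).length = 6
    · have hstep : pvBStep (block, cur) c = (block ++ [cur ++ [c]], []) := by
        simp [pvBStep, h6]
      rw [hstep, ih _ [] (by simp), List.append_assoc]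
      congr 1
      rw [hsplit]
      conv_rhs => rw [pvChunks]
      rw [dif_neg (by simp)]
      rw [List.take_left' h6, List.drop_left' h6, pvLjust6_of_len_six _ h6]
      simp
    · have hstep : pvBStep (block, cur) c = (block, cur ++ [c]) := by
        simp only [pvBStep]; rw [if_neg h6]
      rw [hstep, ih _ (cur ++ [c])
        (by simp only [List.length_append, List.length_cons, List.length_nil] at h6 ⊢; omega)]
      rw [hsplit]

-- ===== VERDICT (by name: the statement is the Claim_ definition above) =====
theorem binblock_spec : Claim_equal_binblock := by
  intro listedbin _
  unfold Spec_binblock binblock binblock_alt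
  have hA := pvA_loop (listedbin.foldl (fun acc s => acc ++ s.toList) [])
    (listedbin.foldl (fun acc s => acc ++ s.toList) []).length 0 [] (by omega)
  have hB := pvB_loop (listedbin.foldl (fun acc s => acc ++ s.toList) []) [] [] (by simp)
  simp only at hA hB ⊢
  rw [hA, hB]
  simp
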